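-- pv_equiv track=rewrite | github.com/Tintin2710/projet_DSSP | contribute_secondary_structure.py | res_helixpi
-- ===== SOURCE A (Python) =====
-- def res_helixpi(dico_res, dico_res_struct, h_pi):
--     """Add pi helix information to all residues in each chain.
--
--     Parameters
--     ----------
--     dico_res : dict
--         Includes all residues organized by chain.
--     dico_res_struct : dict
--         Includes structural information for all residues.
--     h_pi : dict
--         Each chain's residues in pi helices.
--
--     Returns
--     -------
--     dict
--         Updated `dico_res_struct` dictionary.
--     """
--     for chain_id, chain_residues in dico_res.items():
--         if chain_id not in h_pi:
--             continue
--         for res in chain_residues.keys():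
--             if res in h_pi[chain_id]:
--                 dico_res_struct[chain_id][res]['type'] = 'I'
--     return dico_res_struct
-- ===== SOURCE B (Python) =====
-- def res_helixpi(dico_res, dico_res_struct, h_pi):
--     """Rebuild the structure dict as a pure comprehension instead of
--     updating it in place driven by dico_res (return-value equivalent;
--     A mutates dico_res_struct, B does not)."""
--     return {
--         chain: (
--             {res: ({**info, 'type': 'I'}
--                    if res in dico_res[chain] and res in h_pi[chain]
--                    else info)
--              for res, info in rd.items()}
--             if chain in dico_res and chain in h_pi
--             else rd
--         )
--         for chain, rd in dico_res_struct.items()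
--     }
-- ===== Notes on version B (the rewrite author's own statement) =====
-- stated objective: alternative
-- what changed: B rebuilds dico_res_struct as a single pure dict comprehension over the structure dict, testing each residue for membership in dico_res and h_pi, instead of A's in-place update loop driven by dico_res (return-value equivalent; A mutates dico_res_struct, B builds a new dict).
-- outside the precondition, e.g. on res_helixpi({'A': {'r1': 'H'}}, {}, {'A': ['r1']}): A raises KeyError, B returns {}
import Mathlib
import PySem

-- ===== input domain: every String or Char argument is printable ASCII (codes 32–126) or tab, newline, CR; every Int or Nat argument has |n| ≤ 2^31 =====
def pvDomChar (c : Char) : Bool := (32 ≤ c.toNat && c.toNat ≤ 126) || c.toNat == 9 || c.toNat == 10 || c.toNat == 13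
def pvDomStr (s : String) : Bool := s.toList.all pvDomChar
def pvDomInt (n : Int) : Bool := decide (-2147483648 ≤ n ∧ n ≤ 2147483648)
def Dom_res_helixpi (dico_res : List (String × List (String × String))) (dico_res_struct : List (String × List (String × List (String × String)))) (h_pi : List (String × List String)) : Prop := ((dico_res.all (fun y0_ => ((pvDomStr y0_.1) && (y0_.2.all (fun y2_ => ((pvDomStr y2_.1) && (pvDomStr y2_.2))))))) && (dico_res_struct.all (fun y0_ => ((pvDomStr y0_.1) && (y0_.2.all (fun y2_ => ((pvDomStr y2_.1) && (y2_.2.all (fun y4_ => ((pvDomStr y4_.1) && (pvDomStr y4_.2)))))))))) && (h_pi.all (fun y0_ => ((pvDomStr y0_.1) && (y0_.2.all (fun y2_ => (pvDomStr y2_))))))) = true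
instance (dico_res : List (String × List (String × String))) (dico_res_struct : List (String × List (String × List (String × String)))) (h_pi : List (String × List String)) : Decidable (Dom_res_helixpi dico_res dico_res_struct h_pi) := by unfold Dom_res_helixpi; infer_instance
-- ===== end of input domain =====

-- B rebuilds the structure dict as one pure comprehension over dico_res_struct instead of
-- A's in-place update loop driven by dico_res (equivalence is about the RETURN value:
-- Python A mutates dico_res_struct in place, B builds a new dict).

-- ===== PORT A =====
-- dict assignment d['type'] = 'I': overwrite first 'type' entry in place, else append (Python dict semantics)
def pvAssign : List (String × String) → List (String × String)
  | [] => [("type", "I")]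
  | q :: t => if q.1 = "type" then ("type", "I") :: t else q :: pvAssign t

-- dict item mutation d[k] = f(d[k]) on the association list: update the first entry with key k (no-op if absent; Python raises KeyError there, excluded by Pre_)
def pvUpd {β : Type} : List (String × β) → String → (β → β) → List (String × β)
  | [], _, _ => []
  | p :: t, k, f => if p.1 = k then (p.1, f p.2) :: t else p :: pvUpd t k f

-- inner loop of A: 'for res in chain_residues: if res in h_pi[chain_id]: dico_res_struct[chain_id][res]["type"] = "I"'
def resAInner (c : String) (residues : List (String × String)) (pis : List String)
    (st : List (String × List (String × List (String × String)))) :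
    List (String × List (String × List (String × String))) :=
  match residues with
  | [] => st
  | q :: t =>
    resAInner c t pis (if pis.contains q.1 then pvUpd st c (fun rd => pvUpd rd q.1 pvAssign) else st)

def res_helixpi (dico_res : List (String × List (String × String))) (dico_res_struct : List (String × List (String × List (String × String)))) (h_pi : List (String × List String)) : List (String × List (String × List (String × String))) :=
  match dico_res with
  | [] => dico_res_struct
  | p :: rest =>
    res_helixpi rest
      (match List.lookup p.1 h_pi with
       | none => dico_res_struct
       | some pis => resAInner p.1 p.2 pis dico_res_struct) h_pi

-- ===== PORT B =====
def res_helixpi_alt (dico_res : List (String × List (String × String))) (dico_res_struct : List (String × List (String × List (String × String)))) (h_pi : List (String × List String)) : List (String × List (String × List (String × String))) :=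
  dico_res_struct.map (fun e =>
    match List.lookup e.1 dico_res, List.lookup e.1 h_pi with
    | some residues, some pis =>
      (e.1, e.2.map (fun r =>
        if residues.any (fun q => q.1 == r.1) && pis.contains r.1 then (r.1, pvAssign r.2) else r))
    | _, _ => e)

-- ===== PRECONDITION & SPEC =====
-- no KeyError: every residue lying in both dico_res and h_pi must be present in dico_res_struct
def pvOK (dico_res : List (String × List (String × String))) (dico_res_struct : List (String × List (String × List (String × String)))) (h_pi : List (String × List String)) : Bool :=
  dico_res.all fun p =>
    match List.lookup p.1 h_pi with
    | none => true
    | some pis => p.2.all fun q =>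
        !(pis.contains q.1) ||
        (match List.lookup p.1 dico_res_struct with
         | none => false
         | some rd => rd.any (fun r => r.1 == q.1))

-- Pre_ excludes (a) inputs where Python A raises KeyError (a chain/residue present in both
-- dico_res and h_pi but missing from dico_res_struct) and (b) association lists with duplicate
-- keys, which no Python dict can present to A (dicts have unique keys).
def Pre_res_helixpi (dico_res : List (String × List (String × String))) (dico_res_struct : List (String × List (String × List (String × String)))) (h_pi : List (String × List String)) : Prop :=
  (dico_res.map Prod.fst).Nodup ∧ (∀ p ∈ dico_res, (p.2.map Prod.fst).Nodup) ∧
  (dico_res_struct.map Prod.fst).Nodup ∧ (∀ e ∈ dico_res_struct, (e.2.map Prod.fst).Nodup) ∧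
  pvOK dico_res dico_res_struct h_pi = true
instance (dico_res : List (String × List (String × String))) (dico_res_struct : List (String × List (String × List (String × String)))) (h_pi : List (String × List String)) : Decidable (Pre_res_helixpi dico_res dico_res_struct h_pi) := by unfold Pre_res_helixpi; infer_instance

def pvWitness_res_helixpi : (List (String × List (String × String))) × (List (String × List (String × List (String × String)))) × (List (String × List String)) :=
  ([("A", [("r1", "H")])], [("A", [("r1", [("type", "-")])])], [("A", ["r1"])])

def Spec_res_helixpi (dico_res : List (String × List (String × String))) (dico_res_struct : List (String × List (String × List (String × String)))) (h_pi : List (String × List String)) (out : List (String × List (String × List (String × String)))) : Prop := out = res_helixpi_alt dico_res dico_res_struct h_pi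
instance (dico_res : List (String × List (String × String))) (dico_res_struct : List (String × List (String × List (String × String)))) (h_pi : List (String × List String)) (out : List (String × List (String × List (String × String)))) : Decidable (Spec_res_helixpi dico_res dico_res_struct h_pi out) := by unfold Spec_res_helixpi; infer_instance

-- ===== CLAIM (what is proved, stated in full; the proofs are below) =====
def Claim_equal_res_helixpi : Prop := ∀ (dico_res : List (String × List (String × String))) (dico_res_struct : List (String × List (String × List (String × String)))) (h_pi : List (String × List String)), Dom_res_helixpi dico_res dico_res_struct h_pi → Pre_res_helixpi dico_res dico_res_struct h_pi → Spec_res_helixpi dico_res dico_res_struct h_pi (res_helixpi dico_res dico_res_struct h_pi)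


-- ===== LEMMAS AND PROOFS =====

theorem keys_pvUpd {β : Type} (l : List (String × β)) (k : String) (f : β → β) :
    (pvUpd l k f).map Prod.fst = l.map Prod.fst := by
  induction l with
  | nil => rfl
  | cons p t ih => by_cases h : p.1 = k <;> simp [pvUpd, h, ih]

theorem pvUpd_not_mem {β : Type} {l : List (String × β)} {k : String} (f : β → β)
    (h : k ∉ l.map Prod.fst) : pvUpd l k f = l := by
  induction l with
  | nil => rfl
  | cons p t ih =>
    simp only [List.map_cons, List.mem_cons] at h
    push Not at h
    simp [pvUpd, Ne.symm h.1, ih h.2]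

theorem pvUpd_map_of_nodup {β : Type} {l : List (String × β)} (k : String) (f : β → β)
    (h : (l.map Prod.fst).Nodup) :
    pvUpd l k f = l.map (fun r => if r.1 = k then (r.1, f r.2) else r) := by
  induction l with
  | nil => rfl
  | cons p t ih =>
    simp only [List.map_cons, List.nodup_cons] at h
    by_cases hp : p.1 = k
    · subst hp
      have h2 : t.map (fun r => if r.1 = p.1 then (r.1, f r.2) else r) = t := by
        have h1 : ∀ r ∈ t, (if r.1 = p.1 then (r.1, f r.2) else r) = (fun r => r) r := by
          intro r hr
          have : r.1 ≠ p.1 := fun he => h.1 (he ▸ List.mem_map_of_mem hr)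
          simp [this]
        rw [List.map_congr_left h1, List.map_id']
      simp [pvUpd, h2]
    · simp [pvUpd, hp, ih h.2]

theorem lookup_mem {β : Type} {l : List (String × β)} {c : String} {v : β}
    (h : List.lookup c l = some v) : (c, v) ∈ l := by
  induction l with
  | nil => simp [List.lookup] at h
  | cons p t ih =>
    obtain ⟨pk, pv⟩ := p
    rw [List.lookup] at h
    by_cases hc : c = pk
    · simp only [beq_iff_eq.mpr hc, if_pos rfl, Option.some.injEq] at h
      subst hc; subst h
      exact List.mem_cons_self
    · simp only [beq_false_of_ne hc, Bool.false_eq_true, if_false] at h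
      exact List.mem_cons_of_mem _ (ih h)

-- the effect of A's inner loop on a single chain's residue dict
def innerRd (residues : List (String × String)) (pis : List String)
    (rd : List (String × List (String × String))) : List (String × List (String × String)) :=
  match residues with
  | [] => rd
  | q :: t => innerRd t pis (if pis.contains q.1 then pvUpd rd q.1 pvAssign else rd)

theorem aInner_head (c : String) (residues : List (String × String)) (pis : List String)
    (rd : List (String × List (String × String))) (t : List (String × List (String × List (String × String)))) :
    resAInner c residues pis ((c, rd) :: t) = (c, innerRd residues pis rd) :: t := by
  induction residues generalizing rd with
  | nil => rfl
  | cons q tr ih =>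
    rw [resAInner, innerRd]
    by_cases h : q.1 ∈ pis <;> simp [h, pvUpd, ih]

theorem pvUpd_cons_ne {β : Type} (e : String × β) (t : List (String × β)) (k : String) (f : β → β)
    (h : e.1 ≠ k) : pvUpd (e :: t) k f = e :: pvUpd t k f := by
  simp [pvUpd, h]

theorem aInner_skip {c c' : String} (h : c' ≠ c) (residues : List (String × String)) (pis : List String)
    (rd : List (String × List (String × List (String × String)))) (e : String × List (String × List (String × String)))
    (he : e.1 = c) :
    resAInner c' residues pis (e :: rd) = e :: resAInner c' residues pis rd := by
  have hne : e.1 ≠ c' := by rw [he]; exact Ne.symm h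
  induction residues generalizing rd with
  | nil => rfl
  | cons q tr ih =>
    rw [resAInner, resAInner]
    by_cases hq : pis.contains q.1
    · simp only [hq, if_true]
      rw [pvUpd_cons_ne e rd c' _ hne]
      exact ih _
    · simp only [hq]
      exact ih _

theorem aInner_not_mem {c : String} (residues : List (String × String)) (pis : List String)
    {st : List (String × List (String × List (String × String)))}
    (h : c ∉ st.map Prod.fst) : resAInner c residues pis st = st := by
  induction residues with
  | nil => rfl
  | cons q tr ih =>
    rw [resAInner]
    by_cases hq : pis.contains q.1 <;> simp [hq, pvUpd_not_mem _ h, ih]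

theorem keys_aInner (c : String) (residues : List (String × String)) (pis : List String)
    (st : List (String × List (String × List (String × String)))) :
    (resAInner c residues pis st).map Prod.fst = st.map Prod.fst := by
  induction residues generalizing st with
  | nil => rfl
  | cons q tr ih =>
    rw [resAInner, ih]
    by_cases h : q.1 ∈ pis <;> simp [h, keys_pvUpd]

-- the cumulative effect of A's whole loop on the single struct entry with key c
def chainA (c : String) (dico_res : List (String × List (String × String))) (h_pi : List (String × List String))
    (rd : List (String × List (String × String))) : List (String × List (String × String)) :=
  match dico_res with
  | [] => rd
  | p :: rest =>
    chainA c rest h_pi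
      (if p.1 = c then
        (match List.lookup c h_pi with
         | none => rd
         | some pis => innerRd p.2 pis rd)
       else rd)

theorem resA_nil (dico_res : List (String × List (String × String))) (h_pi : List (String × List String)) :
    res_helixpi dico_res [] h_pi = [] := by
  induction dico_res with
  | nil => rfl
  | cons p rest ih =>
    rw [res_helixpi]
    cases h : List.lookup p.1 h_pi with
    | none => simpa [h] using ih
    | some pis =>
      simpa [h, aInner_not_mem (st := []) p.2 pis (by simp)] using ih

theorem resA_split {c : String} (dico_res : List (String × List (String × String))) (h_pi : List (String × List String))
    (rd : List (String × List (String × String))) {t : List (String × List (String × List (String × String)))}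
    (h : c ∉ t.map Prod.fst) :
    res_helixpi dico_res ((c, rd) :: t) h_pi = (c, chainA c dico_res h_pi rd) :: res_helixpi dico_res t h_pi := by
  induction dico_res generalizing rd t with
  | nil => rfl
  | cons p rest ih =>
    by_cases hpc : p.1 = c
    · subst hpc
      cases hl : List.lookup p.1 h_pi with
      | none =>
        simp only [res_helixpi, chainA, hl, if_pos rfl]
        exact ih rd h
      | some pis =>
        simp only [res_helixpi, chainA, hl, if_pos rfl]
        rw [aInner_head, aInner_not_mem p.2 pis h]
        exact ih _ h
    · cases hl : List.lookup p.1 h_pi with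
      | none =>
        simp only [res_helixpi, chainA, hl, if_neg hpc]
        exact ih rd h
      | some pis =>
        simp only [res_helixpi, chainA, hl, if_neg hpc]
        rw [aInner_skip hpc p.2 pis t (c, rd) rfl]
        have h' : c ∉ (resAInner p.1 p.2 pis t).map Prod.fst := by rw [keys_aInner]; exact h
        exact ih rd h'

theorem chainA_not_mem {c : String} {dico_res : List (String × List (String × String))}
    (h_pi : List (String × List String)) (rd : List (String × List (String × String)))
    (h : c ∉ dico_res.map Prod.fst) : chainA c dico_res h_pi rd = rd := by
  induction dico_res generalizing rd with
  | nil => rfl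
  | cons p rest ih =>
    simp only [List.map_cons, List.mem_cons] at h
    push_neg at h
    rw [chainA, if_neg (fun he => h.1 he.symm)]
    exact ih rd h.2

theorem chainA_eq {c : String} {dico_res : List (String × List (String × String))}
    (h_pi : List (String × List String)) (rd : List (String × List (String × String)))
    (hnd : (dico_res.map Prod.fst).Nodup) :
    chainA c dico_res h_pi rd =
      match List.lookup c dico_res, List.lookup c h_pi with
      | some residues, some pis => innerRd residues pis rd
      | _, _ => rd := by
  induction dico_res generalizing rd with
  | nil => simp [chainA, List.lookup]
  | cons p rest ih =>
    simp only [List.map_cons, List.nodup_cons] at hnd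
    by_cases hpc : p.1 = c
    · have hck : c ∉ rest.map Prod.fst := hpc ▸ hnd.1
      rw [chainA, if_pos hpc, List.lookup, beq_iff_eq.mpr hpc.symm]
      simp only [if_pos rfl]
      cases List.lookup c h_pi with
      | none => exact chainA_not_mem h_pi rd hck
      | some pis => exact chainA_not_mem h_pi _ hck
    · rw [chainA, if_neg hpc, List.lookup, beq_false_of_ne (fun he => hpc he.symm)]
      exact ih rd hnd.2

theorem innerRd_eq {residues : List (String × String)} (pis : List String)
    {rd : List (String × List (String × String))}
    (hres : (residues.map Prod.fst).Nodup) (hrd : (rd.map Prod.fst).Nodup) :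
    innerRd residues pis rd =
      rd.map (fun r => if residues.any (fun q => q.1 == r.1) && pis.contains r.1 then (r.1, pvAssign r.2) else r) := by
  induction residues generalizing rd with
  | nil =>
    have h1 : ∀ r ∈ rd,
        (if (([] : List (String × String)).any fun q => q.1 == r.1) && pis.contains r.1 then (r.1, pvAssign r.2) else r)
          = (fun r => r) r := by
      intro r _
      rfl
    rw [innerRd, List.map_congr_left h1, List.map_id']
  | cons q tr ih =>
    simp only [List.map_cons, List.nodup_cons] at hres
    have hq : q.1 ∉ tr.map Prod.fst := hres.1
    have hany : (tr.any fun p => p.1 == q.1) = false := by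
      rw [List.any_eq_false]
      intro p hp hbe
      exact hq ((eq_of_beq hbe) ▸ List.mem_map_of_mem hp)
    rw [innerRd]
    by_cases hc : pis.contains q.1
    · have hcm : q.1 ∈ pis := by simpa using hc
      rw [if_pos hc,
        ih hres.2 (show ((pvUpd rd q.1 pvAssign).map Prod.fst).Nodup by rw [keys_pvUpd]; exact hrd),
        pvUpd_map_of_nodup q.1 pvAssign hrd, List.map_map]
      refine List.map_congr_left ?_
      intro r _
      by_cases hr : r.1 = q.1
      · simp only [Function.comp_apply, if_pos hr, hr]
        simp [hany, hcm]
      · simp only [Function.comp_apply, if_neg hr]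
        rw [List.any_cons, beq_false_of_ne (fun he => hr he.symm), Bool.false_or]
    · have hcm : q.1 ∉ pis := by simpa using hc
      rw [if_neg hc, ih hres.2 hrd]
      refine List.map_congr_left ?_
      intro r _
      by_cases hr : r.1 = q.1
      · simp [hr, hany, hcm]
      · rw [List.any_cons, beq_false_of_ne (fun he => hr he.symm), Bool.false_or]

theorem resA_eq_alt (dico_res : List (String × List (String × String)))
    (st : List (String × List (String × List (String × String)))) (h_pi : List (String × List String))
    (hdr : (dico_res.map Prod.fst).Nodup) (hdri : ∀ p ∈ dico_res, (p.2.map Prod.fst).Nodup)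
    (hst : (st.map Prod.fst).Nodup) (hsti : ∀ e ∈ st, (e.2.map Prod.fst).Nodup) :
    res_helixpi dico_res st h_pi = res_helixpi_alt dico_res st h_pi := by
  induction st with
  | nil => rw [resA_nil]; rfl
  | cons e t ih =>
    obtain ⟨c, rd⟩ := e
    simp only [List.map_cons, List.nodup_cons] at hst
    rw [resA_split dico_res h_pi rd hst.1,
      ih hst.2 (fun e he => hsti e (List.mem_cons_of_mem _ he)),
      chainA_eq h_pi rd hdr]
    rw [res_helixpi_alt, res_helixpi_alt, List.map_cons]
    congr 1
    cases hl : List.lookup c dico_res with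
    | none => cases List.lookup c h_pi <;> rfl
    | some residues =>
      cases hl2 : List.lookup c h_pi with
      | none => rfl
      | some pis =>
        simp only []
        rw [innerRd_eq pis (hdri _ (lookup_mem hl)) (hsti (c, rd) (List.mem_cons_self))]

-- ===== VERDICT (by name: the statement is the Claim_ definition above) =====
theorem res_helixpi_spec : Claim_equal_res_helixpi := by
  intro dico_res dico_res_struct h_pi _ hpre
  unfold Spec_res_helixpi
  exact resA_eq_alt dico_res dico_res_struct h_pi hpre.1 hpre.2.1 hpre.2.2.1 hpre.2.2.2.1
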